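-- pv_equiv track=rewrite | github.com/nguyenbahung94/docwise | tools/doc_extractor.py | filter_kotlin_preferred
-- ===== SOURCE A (Python) =====
-- from typing import Dict, List, Optional, Tuple
--
-- def filter_kotlin_preferred(code_blocks: List[Dict]) -> List[Dict]:
--     """
--     When a sequence of code blocks has lang_labels like kotlin/java/groovy,
--     keep only the Kotlin one. Unlabelled blocks are kept as-is.
--     """
--     result = []
--     i = 0
--     while i < len(code_blocks):
--         block = code_blocks[i]
--         label = block.get("lang_label", "")
--         if label in ("kotlin", "java", "groovy", "kts"):
--             # Collect the full group of language-labelled consecutive blocks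
--             group = [block]
--             j = i + 1
--             while j < len(code_blocks) and code_blocks[j].get("lang_label", "") in ("kotlin", "java", "groovy", "kts"):
--                 group.append(code_blocks[j])
--                 j += 1
--             # Keep only Kotlin (or Kts) from the group; fall back to first if none
--             kotlin_blocks = [b for b in group if b.get("lang_label", "") in ("kotlin", "kts")]
--             result.extend(kotlin_blocks if kotlin_blocks else [group[0]])
--             i = j
--         else:
--             result.append(block)
--             i += 1
--     return result
-- ===== SOURCE B (Python) =====
-- from typing import Dict, List
--
-- _LABELLED = ("kotlin", "java", "groovy", "kts")
-- _KOTLIN = ("kotlin", "kts")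
--
--
-- def _flush(buf: List[Dict]) -> List[Dict]:
--     kotlin_blocks = [b for b in buf if b.get("lang_label", "") in _KOTLIN]
--     if kotlin_blocks:
--         return kotlin_blocks
--     return buf[:1]
--
--
-- def filter_kotlin_preferred(code_blocks: List[Dict]) -> List[Dict]:
--     """Single forward pass with a pending buffer of consecutive labelled blocks."""
--     result: List[Dict] = []
--     buf: List[Dict] = []
--     for block in code_blocks:
--         if block.get("lang_label", "") in _LABELLED:
--             buf.append(block)
--         else:
--             result.extend(_flush(buf))
--             buf = []
--             result.append(block)
--     result.extend(_flush(buf))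
--     return result
-- ===== Notes on version B (the rewrite author's own statement) =====
-- stated objective: simpler
-- what changed: Replaces A's index-based while loop with an inner look-ahead scan by a single forward for-loop that buffers consecutive labelled blocks and flushes the buffer (kotlin/kts members, else its first element) at each unlabelled block and at the end.
import Mathlib
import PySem

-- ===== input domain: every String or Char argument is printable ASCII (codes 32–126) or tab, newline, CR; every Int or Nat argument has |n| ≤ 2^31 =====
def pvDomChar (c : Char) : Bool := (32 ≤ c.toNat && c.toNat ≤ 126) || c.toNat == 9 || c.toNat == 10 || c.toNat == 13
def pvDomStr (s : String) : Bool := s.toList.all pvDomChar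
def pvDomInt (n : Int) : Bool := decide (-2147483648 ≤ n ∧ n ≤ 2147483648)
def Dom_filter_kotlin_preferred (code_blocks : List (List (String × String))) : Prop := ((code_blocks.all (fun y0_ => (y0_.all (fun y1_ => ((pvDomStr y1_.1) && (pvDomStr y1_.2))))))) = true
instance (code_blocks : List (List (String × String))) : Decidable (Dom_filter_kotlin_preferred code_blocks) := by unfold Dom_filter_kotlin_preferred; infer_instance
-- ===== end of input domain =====

-- B replaces A's index-based while loop with inner look-ahead by one forward pass
-- over the blocks that buffers consecutive labelled blocks and flushes the buffer
-- at each unlabelled block and at the end (objective: simpler).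

-- shared accessor: block.get("lang_label", "") — first match in the association list
def pvGetLabel (b : List (String × String)) : String :=
  match b.find? (fun kv => kv.1 == "lang_label") with
  | some kv => kv.2
  | none => ""

def pvIsLabelled (s : String) : Bool :=
  s == "kotlin" || s == "java" || s == "groovy" || s == "kts"

def pvIsKotlin (s : String) : Bool :=
  s == "kotlin" || s == "kts"

-- ===== PORT A =====
-- A's inner while loop: collect the consecutive labelled group and the remaining blocks
def pvAGroup : List (List (String × String)) → List (List (String × String)) × List (List (String × String))
  | [] => ([], [])
  | b :: rest =>
    if pvIsLabelled (pvGetLabel b) then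
      let p := pvAGroup rest
      (b :: p.1, p.2)
    else ([], b :: rest)

-- termination measure for A's outer loop (i jumps to j past the group)
lemma pvAGroup_len (l : List (List (String × String))) : (pvAGroup l).2.length ≤ l.length := by
  induction l with
  | nil => simp [pvAGroup]
  | cons b rest ih =>
    simp only [pvAGroup]
    split
    · exact Nat.le_succ_of_le ih
    · simp

def filter_kotlin_preferred (code_blocks : List (List (String × String))) : List (List (String × String)) :=
  match code_blocks with
  | [] => []
  | b :: rest =>
    if pvIsLabelled (pvGetLabel b) then
      let p := pvAGroup rest
      let group := b :: p.1
      let kotlin_blocks := group.filter (fun x => pvIsKotlin (pvGetLabel x))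
      -- group[0] = b
      (if kotlin_blocks.isEmpty then [b] else kotlin_blocks) ++ filter_kotlin_preferred p.2
    else
      b :: filter_kotlin_preferred rest
termination_by code_blocks.length
decreasing_by
  · exact Nat.lt_succ_of_le (pvAGroup_len rest)
  · simp

-- ===== PORT B =====
-- _flush: the kotlin/kts members of the buffer, or buf[:1] if there are none
def pvFlush (buf : List (List (String × String))) : List (List (String × String)) :=
  let kotlin_blocks := buf.filter (fun x => pvIsKotlin (pvGetLabel x))
  if kotlin_blocks.isEmpty then buf.take 1 else kotlin_blocks

-- one step of B's forward pass over (result, buf)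
def pvBStep (st : List (List (String × String)) × List (List (String × String)))
    (block : List (String × String)) :
    List (List (String × String)) × List (List (String × String)) :=
  if pvIsLabelled (pvGetLabel block) then (st.1, st.2 ++ [block])
  else (st.1 ++ pvFlush st.2 ++ [block], [])

def filter_kotlin_preferred_alt (code_blocks : List (List (String × String))) : List (List (String × String)) :=
  let st := code_blocks.foldl pvBStep ([], [])
  st.1 ++ pvFlush st.2

-- ===== PRECONDITION & SPEC =====
def Spec_filter_kotlin_preferred (code_blocks : List (List (String × String))) (out : List (List (String × String))) : Prop := out = filter_kotlin_preferred_alt code_blocks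
instance (code_blocks : List (List (String × String))) (out : List (List (String × String))) : Decidable (Spec_filter_kotlin_preferred code_blocks out) := by unfold Spec_filter_kotlin_preferred; infer_instance

-- ===== CLAIM (what is proved, stated in full; the proofs are below) =====
def Claim_equal_filter_kotlin_preferred : Prop := ∀ (code_blocks : List (List (String × String))), Dom_filter_kotlin_preferred code_blocks → Spec_filter_kotlin_preferred code_blocks (filter_kotlin_preferred code_blocks)

-- ===== LEMMAS AND PROOFS =====

-- reference function: B's pass written recursively over the remaining blocks
def pvF (buf : List (List (String × String))) : List (List (String × String)) → List (List (String × String))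
  | [] => pvFlush buf
  | b :: t =>
    if pvIsLabelled (pvGetLabel b) then pvF (buf ++ [b]) t
    else pvFlush buf ++ b :: pvF [] t

lemma pvA_cons_unlabelled (b : List (String × String)) (t : List (List (String × String)))
    (h : ¬ pvIsLabelled (pvGetLabel b) = true) :
    filter_kotlin_preferred (b :: t) = b :: filter_kotlin_preferred t := by
  rw [filter_kotlin_preferred.eq_def]
  simp [h]

lemma pvFoldl_eq_pvF (l : List (List (String × String))) :
    ∀ res buf, (l.foldl pvBStep (res, buf)).1 ++ pvFlush (l.foldl pvBStep (res, buf)).2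
      = res ++ pvF buf l := by
  induction l with
  | nil => intro res buf; simp [pvF]
  | cons b t ih =>
    intro res buf
    simp only [List.foldl_cons, pvBStep, pvF]
    by_cases h : pvIsLabelled (pvGetLabel b) = true
    · simp [h, ih]
    · simp [h, ih]

lemma pvF_eq_A : ∀ (n : Nat) (l : List (List (String × String))), l.length ≤ n → ∀ buf,
    pvF buf l = pvFlush (buf ++ (pvAGroup l).1) ++ filter_kotlin_preferred (pvAGroup l).2 := by
  intro n
  induction n with
  | zero =>
    intro l hl buf
    have : l = [] := List.eq_nil_of_length_eq_zero (Nat.le_zero.mp hl)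
    subst this
    simp [pvF, pvAGroup, filter_kotlin_preferred]
  | succ n ih =>
    intro l hl buf
    match l with
    | [] => simp [pvF, pvAGroup, filter_kotlin_preferred]
    | b :: t =>
      by_cases h : pvIsLabelled (pvGetLabel b) = true
      · have ht : t.length ≤ n := Nat.le_of_succ_le_succ hl
        simp only [pvF, pvAGroup, h, if_pos]
        rw [ih t ht (buf ++ [b])]
        simp
      · -- unlabelled head: the group before b (from buf) is flushed, b kept
        have ht : t.length ≤ n := Nat.le_of_succ_le_succ hl
        have hA : pvF [] t = filter_kotlin_preferred t := by
          rw [ih t ht []]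
          match t with
          | [] => simp [pvAGroup, pvFlush, filter_kotlin_preferred]
          | c :: u =>
            by_cases hc : pvIsLabelled (pvGetLabel c) = true
            · simp only [pvAGroup, hc, if_pos, List.nil_append]
              conv_rhs => rw [filter_kotlin_preferred.eq_def]
              simp only [hc, if_pos, pvFlush]
              split <;> simp_all [List.take]
            · simp [pvAGroup, hc, pvFlush, pvA_cons_unlabelled c u hc]
        simp only [pvF, pvAGroup, h]
        rw [hA]
        conv_rhs => rw [filter_kotlin_preferred.eq_def]
        simp [h]

-- ===== VERDICT (by name: the statement is the Claim_ definition above) =====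
theorem filter_kotlin_preferred_spec : Claim_equal_filter_kotlin_preferred := by
  intro cbs _
  unfold Spec_filter_kotlin_preferred filter_kotlin_preferred_alt
  rw [pvFoldl_eq_pvF cbs [] []]
  rw [pvF_eq_A cbs.length cbs (Nat.le_refl _) []]
  simp only [List.nil_append]
  match cbs with
  | [] => simp [pvAGroup, pvFlush, filter_kotlin_preferred]
  | b :: t =>
    by_cases h : pvIsLabelled (pvGetLabel b) = true
    · simp only [pvAGroup, h, if_pos]
      conv_lhs => rw [filter_kotlin_preferred.eq_def]
      simp only [h, if_pos, pvFlush]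
      split <;> simp_all [List.take]
    · simp [pvAGroup, h, pvFlush, pvA_cons_unlabelled b t h]
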